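-- pv_equiv track=rewrite | github.com/araghukas/nwlattice | nwlattice/nw_chirped.py | get_plane_index
-- ===== SOURCE A (Python) =====
-- def get_plane_index(nz: int, q: int) -> set:
--     top = 0
--     index = [0]
--     while q > 0:
--         for i in range(2):
--             index.append(top + q)
--             top += q
--         q -= 1
--
--     return set(index)
-- ===== SOURCE B (Python) =====
-- def get_plane_index(nz: int, q: int) -> set:
--     result = {0}
--     for j in range(1, q + 1):
--         k = q - j + 1
--         full = (q + k) * (q - k + 1)
--         result.add(full - k)
--         result.add(full)
--     return result
-- ===== Notes on version B (the rewrite author's own statement) =====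
-- stated objective: alternative
-- what changed: Replaces A's while-loop with running accumulator top and an inner range(2) loop by a single for-loop that computes each collected value directly from the closed form full = (q+k)(q-k+1) (and full-k) for each level k.
import Mathlib
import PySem

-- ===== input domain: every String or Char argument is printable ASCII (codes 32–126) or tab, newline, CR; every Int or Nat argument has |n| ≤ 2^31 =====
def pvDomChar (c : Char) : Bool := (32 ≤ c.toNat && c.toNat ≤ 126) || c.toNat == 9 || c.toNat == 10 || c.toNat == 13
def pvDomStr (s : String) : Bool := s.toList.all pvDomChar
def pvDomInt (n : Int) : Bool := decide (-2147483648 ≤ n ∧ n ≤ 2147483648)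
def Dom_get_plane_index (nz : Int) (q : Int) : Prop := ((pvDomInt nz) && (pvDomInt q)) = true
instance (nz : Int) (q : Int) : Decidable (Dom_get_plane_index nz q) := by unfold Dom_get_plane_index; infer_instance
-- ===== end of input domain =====

-- B replaces A's running accumulator + inner range(2) loop by the closed form (q+k)(q-k+1) per level; objective: alternative (same cost, no speed claim).

-- ===== PORT A =====
-- while q > 0: for i in range(2): index.append(top+q); top += q; then q -= 1
def pvAloop (top : Int) (index : List Int) (q : Int) : List Int :=
  if h : q > 0 then
    let st := (PySem.List.pyRange 0 2 1).foldl
      (fun (st : Int × List Int) _ => (st.1 + q, st.2 ++ [st.1 + q])) (top, index)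
    pvAloop st.1 st.2 (q - 1)
  else index
termination_by q.toNat
decreasing_by omega

def get_plane_index (nz : Int) (q : Int) : List Int :=
  PySem.Set.ofList (pvAloop 0 [0] q)

-- ===== PORT B =====
def get_plane_index_alt (nz : Int) (q : Int) : List Int :=
  (PySem.List.pyRange 1 (q + 1) 1).foldl
    (fun (result : PySem.Set Int) j =>
      let k := q - j + 1
      let full := (q + k) * (q - k + 1)
      PySem.Set.add (PySem.Set.add result (full - k)) full)
    (PySem.Set.ofList [0])

-- ===== PRECONDITION & SPEC =====
def Spec_get_plane_index (nz : Int) (q : Int) (out : List Int) : Prop := out = get_plane_index_alt nz q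
instance (nz : Int) (q : Int) (out : List Int) : Decidable (Spec_get_plane_index nz q out) := by unfold Spec_get_plane_index; infer_instance

-- ===== CLAIM (what is proved, stated in full; the proofs are below) =====
def Claim_equal_get_plane_index : Prop := ∀ (nz : Int) (q : Int), Dom_get_plane_index nz q → Spec_get_plane_index nz q (get_plane_index nz q)

-- ===== LEMMAS AND PROOFS =====

-- the common spine: values collected at levels k, k-1, ..., 1
def pairsF (q k : Int) : List Int :=
  if h : 0 < k then (q*q + q - k*k) :: (q*q + q - k*k + k) :: pairsF q (k - 1) else []
termination_by k.toNat
decreasing_by omega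

lemma pvAloop_eq (q k : Int) (index : List Int) :
    pvAloop (q*q + q - k*k - k) index k = index ++ pairsF q k := by
  by_cases h : 0 < k
  · rw [pairsF]
    simp only [dif_pos h]
    rw [pvAloop]
    simp only [dif_pos h]
    have hr : PySem.List.pyRange 0 2 1 = [0, 1] := by decide
    rw [hr]
    simp only [List.foldl]
    have e1 : q*q + q - k*k - k + k + k = q*q + q - (k-1)*(k-1) - (k-1) := by ring
    rw [e1, pvAloop_eq q (k-1)]
    have e2 : q*q + q - k*k - k + k = q*q + q - k*k := by ring
    have e3 : q*q + q - (k-1)*(k-1) - (k-1) = q*q + q - k*k + k := by ring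
    rw [e2, e3]
    simp [List.append_assoc]
  · rw [pvAloop, pairsF]
    simp [h]
termination_by k.toNat
decreasing_by omega

lemma pairsF_bound (q k : Int) : ∀ x ∈ pairsF q k, q*q + q - k*k - k < x := by
  rw [pairsF]
  by_cases h : 0 < k
  · simp only [dif_pos h, List.mem_cons]
    rintro x (rfl | rfl | hx)
    · linarith
    · linarith
    · have := pairsF_bound q (k-1) x hx
      nlinarith
  · simp [dif_neg h]
termination_by k.toNat
decreasing_by omega

lemma pairsF_pairwise (q k : Int) : (pairsF q k).Pairwise (· < ·) := by
  rw [pairsF]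
  by_cases h : 0 < k
  · simp only [dif_pos h]
    refine List.Pairwise.cons ?_ (List.Pairwise.cons ?_ (pairsF_pairwise q (k-1)))
    · intro x hx
      rcases List.mem_cons.mp hx with rfl | hx
      · linarith
      · have := pairsF_bound q (k-1) x hx
        nlinarith
    · intro x hx
      have := pairsF_bound q (k-1) x hx
      nlinarith
  · simp [dif_neg h]
termination_by k.toNat
decreasing_by omega

lemma spine_nodup (q : Int) : (0 :: pairsF q q).Nodup := by
  refine List.Pairwise.cons ?_ ((pairsF_pairwise q q).imp (fun h => ne_of_lt h))
  intro x hx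
  have := pairsF_bound q q x hx
  nlinarith

lemma foldl_add_of_nodup (l : List Int) : ∀ (s : PySem.Set Int),
    (∀ x ∈ l, x ∉ s) → l.Nodup → l.foldl PySem.Set.add s = s ++ l := by
  induction l with
  | nil => intro s _ _; simp
  | cons a t ih =>
    intro s hmem hnd
    simp only [List.foldl_cons, PySem.Set.add_of_not_mem (hmem a (by simp))]
    rw [ih (s ++ [a]) ?_ (List.nodup_cons.mp hnd).2]
    · simp
    · intro x hx
      simp only [List.mem_append, List.mem_singleton]
      rintro (hxs | rfl)
      · exact hmem x (by simp [hx]) hxs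
      · exact (List.nodup_cons.mp hnd).1 hx

lemma ofList_spine (q : Int) :
    PySem.Set.ofList (0 :: pairsF q q) = 0 :: pairsF q q := by
  rw [PySem.Set.ofList_eq_foldl, foldl_add_of_nodup _ [] (by simp) (spine_nodup q)]
  rfl

lemma pvB_eq (q k : Int) : ∀ (s : PySem.Set Int),
    (∀ x ∈ s, x ≤ q*q + q - k*k - k) →
    (PySem.List.pyRange (q - k + 1) (q + 1) 1).foldl
      (fun (result : PySem.Set Int) j =>
        let k := q - j + 1
        let full := (q + k) * (q - k + 1)
        PySem.Set.add (PySem.Set.add result (full - k)) full)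
      s = s ++ pairsF q k := by
  intro s hs
  by_cases h : 0 < k
  · rw [pairsF, dif_pos h, PySem.List.pyRange_one_cons (by omega)]
    simp only [List.foldl_cons]
    have hk' : q - (q - k + 1) + 1 = k := by ring
    simp only [hk']
    have hfk : (q + k) * (q - k + 1) - k = q*q + q - k*k := by ring
    have hf : (q + k) * (q - k + 1) = q*q + q - k*k + k := by ring
    rw [hfk, hf]
    have h1 : PySem.Set.add s (q*q + q - k*k) = s ++ [q*q + q - k*k] :=
      PySem.Set.add_of_not_mem (by intro hx; have := hs _ hx; omega)
    have h2 : PySem.Set.add (s ++ [q*q + q - k*k]) (q*q + q - k*k + k)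
        = s ++ [q*q + q - k*k] ++ [q*q + q - k*k + k] := by
      refine PySem.Set.add_of_not_mem ?_
      intro hx
      rcases List.mem_append.mp hx with hx | hx
      · have := hs _ hx; omega
      · simp at hx; omega
    rw [h1, h2]
    have hrn : q - k + 1 + 1 = q - (k - 1) + 1 := by ring
    rw [hrn, pvB_eq q (k-1) _ ?_]
    · simp [List.append_assoc]
    · intro x hx
      rcases List.mem_append.mp hx with hx | hx
      · rcases List.mem_append.mp hx with hx | hx
        · have := hs _ hx; nlinarith
        · simp at hx; subst hx; nlinarith
      · simp at hx; subst hx; nlinarith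
  · rw [pairsF, dif_neg h, PySem.List.pyRange_one_eq_nil (by omega)]
    simp
termination_by k.toNat
decreasing_by omega

lemma portA_spine (nz q : Int) : get_plane_index nz q = PySem.Set.ofList (0 :: pairsF q q) := by
  unfold get_plane_index
  have h := pvAloop_eq q q [0]
  rw [show q*q + q - q*q - q = (0:Int) by ring] at h
  rw [h]
  rfl

lemma portB_spine (nz q : Int) : get_plane_index_alt nz q = 0 :: pairsF q q := by
  have h := pvB_eq q q [0] (by intro x hx; simp at hx; subst hx; nlinarith)
  rw [show q - q + 1 = (1:Int) by ring] at h
  unfold get_plane_index_alt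
  have h0 : PySem.Set.ofList [(0:Int)] = [0] := by decide
  rw [h0]
  exact h

-- ===== VERDICT (by name: the statement is the Claim_ definition above) =====
theorem get_plane_index_spec : Claim_equal_get_plane_index := by
  intro nz q _
  unfold Spec_get_plane_index
  rw [portA_spine, portB_spine, ofList_spine]
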